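-- pv_equiv track=rewrite | github.com/mzezin/AILearning | 006-Python/Lesson01/Seminar01/task2.py | find_max_of_5
-- ===== SOURCE A (Python) =====
-- def find_max_of_5(numbers):
--     if type(numbers) != list:
--         return None
--     if len(numbers) != 5:
--         return None
--     max_number = numbers[0]
--     for i in numbers:
--         if i > max_number:
--             max_number = i
--     return max_number
-- ===== SOURCE B (Python) =====
-- def find_max_of_5(numbers):
--     if type(numbers) != list:
--         return None
--     if len(numbers) != 5:
--         return None
--     return sorted(numbers)[-1]
-- ===== Notes on version B (the rewrite author's own statement) =====
-- stated objective: alternative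
-- what changed: Replaces the accumulator loop maintaining a running maximum with sorting the list and returning its last element.
import Mathlib
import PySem

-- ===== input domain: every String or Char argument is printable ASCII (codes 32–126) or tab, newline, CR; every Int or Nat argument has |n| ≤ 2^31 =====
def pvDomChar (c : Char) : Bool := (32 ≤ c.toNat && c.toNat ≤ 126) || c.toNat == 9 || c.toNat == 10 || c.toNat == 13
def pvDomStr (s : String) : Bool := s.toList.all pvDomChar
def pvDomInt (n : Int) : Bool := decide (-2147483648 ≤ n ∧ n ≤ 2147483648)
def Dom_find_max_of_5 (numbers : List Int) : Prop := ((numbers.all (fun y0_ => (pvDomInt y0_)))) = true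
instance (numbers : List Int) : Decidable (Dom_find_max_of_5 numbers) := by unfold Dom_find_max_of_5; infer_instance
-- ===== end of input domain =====

-- B sorts the list and returns its last element instead of A's running-maximum loop; same result on all Int lists.
-- (The Lean argument is List Int, so A's 'type(numbers) != list' guard is vacuously false and not ported.)

-- ===== PORT A =====
def find_max_of_5 (numbers : List Int) : Option Int :=
  if numbers.length ≠ 5 then none
  else
    -- max_number = numbers[0]; in-range under the length guard, default never used
    let max_number := PySem.List.pyGetD numbers 0 0
    some (numbers.foldl (fun max_number i => if i > max_number then i else max_number) max_number)

-- ===== PORT B =====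
def find_max_of_5_alt (numbers : List Int) : Option Int :=
  if numbers.length ≠ 5 then none
  else PySem.List.pyGet? (PySem.List.sorted numbers (fun x => x) false) (-1)

-- ===== PRECONDITION & SPEC =====
def Spec_find_max_of_5 (numbers : List Int) (out : Option Int) : Prop := out = find_max_of_5_alt numbers
instance (numbers : List Int) (out : Option Int) : Decidable (Spec_find_max_of_5 numbers out) := by unfold Spec_find_max_of_5; infer_instance

-- ===== CLAIM (what is proved, stated in full; the proofs are below) =====
def Claim_equal_find_max_of_5 : Prop := ∀ (numbers : List Int), Dom_find_max_of_5 numbers → Spec_find_max_of_5 numbers (find_max_of_5 numbers)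

-- ===== LEMMAS AND PROOFS =====

-- A's loop body is max
theorem pv_foldl_if_eq_max (l : List Int) (a : Int) :
    l.foldl (fun m i => if i > m then i else m) a = l.foldl max a := by
  induction l generalizing a with
  | nil => rfl
  | cons x t ih =>
    simp only [List.foldl_cons, ih]
    congr 1
    by_cases h : x > a <;> simp [h, max_def] <;> omega

theorem pv_foldl_max_mem (l : List Int) (a : Int) : l.foldl max a ∈ a :: l := by
  induction l generalizing a with
  | nil => simp
  | cons x t ih =>
    simp only [List.foldl_cons]
    rcases List.mem_cons.mp (ih (max a x)) with h | h
    · rcases max_choice a x with h' | h' <;> rw [h, h'] <;> simp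
    · simp [h]

theorem pv_init_le_foldl_max (l : List Int) (a : Int) : a ≤ l.foldl max a := by
  induction l generalizing a with
  | nil => simp
  | cons x t ih =>
    simp only [List.foldl_cons]
    exact le_trans (le_max_left a x) (ih (max a x))

theorem pv_le_foldl_max (l : List Int) : ∀ (a x : Int), x ∈ a :: l → x ≤ l.foldl max a := by
  induction l with
  | nil => intro a x hx; simp at hx; simp [hx]
  | cons y t ih =>
    intro a x hx
    simp only [List.foldl_cons]
    rcases List.mem_cons.mp hx with h | h
    · exact le_trans (h ▸ le_max_left a y) (pv_init_le_foldl_max t (max a y))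
    · rcases List.mem_cons.mp h with h' | h'
      · exact le_trans (h' ▸ le_max_right a y) (pv_init_le_foldl_max t (max a y))
      · exact ih (max a y) x (List.mem_cons.mpr (Or.inr h'))

theorem pv_getLast_ge_of_pairwise (l : List Int) :
    ∀ (hp : l.Pairwise (· ≤ ·)) (h : l ≠ []) (x : Int), x ∈ l → x ≤ l.getLast h := by
  induction l with
  | nil => intro _ h; exact absurd rfl h
  | cons y t ih =>
    intro hp h x hx
    cases t with
    | nil => simp at hx; simp [hx, List.getLast]
    | cons z u =>
      rw [List.getLast_cons (by simp)]
      rcases List.mem_cons.mp hx with h' | h'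
      · subst h'
        exact le_trans (List.rel_of_pairwise_cons hp (by simp))
          (ih hp.of_cons (by simp) z (by simp))
      · exact ih hp.of_cons (by simp) x h'

-- ===== VERDICT (by name: the statement is the Claim_ definition above) =====
theorem find_max_of_5_spec : Claim_equal_find_max_of_5 := by
  intro numbers _
  unfold Spec_find_max_of_5 find_max_of_5 find_max_of_5_alt
  by_cases hlen : numbers.length ≠ 5
  · simp [hlen]
  · push_neg at hlen
    have hne : numbers ≠ [] := by intro h; simp [h] at hlen
    simp only [hlen, ne_eq, not_true_eq_false, if_false]
    set s := PySem.List.sorted numbers (fun x => x) false with hs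
    have hperm : s.Perm numbers := PySem.List.sorted_perm _ _ _
    have hsne : s ≠ [] := by
      intro h
      rw [h] at hperm
      exact hne (List.Perm.eq_nil hperm.symm)
    rw [PySem.List.pyGet?_neg_one, List.getLast?_eq_some_getLast hsne]
    obtain ⟨a, t, ht⟩ := List.exists_cons_of_ne_nil hne
    subst ht
    rw [pv_foldl_if_eq_max]
    have hget : PySem.List.pyGetD (a :: t) 0 0 = a := PySem.List.pyGetD_zero_cons ..
    rw [hget]
    have hpair : s.Pairwise (· ≤ ·) := by
      have := PySem.List.sorted_pairwise (xs := a :: t) (key := fun x => x)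
      simpa using this
    -- both sides are the maximum of a :: t
    have hmemL : (a :: t).foldl max a ∈ a :: t := by
      rcases List.mem_cons.mp (pv_foldl_max_mem (a :: t) a) with h | h
      · simp [h]
      · exact h
    have hmemR : s.getLast hsne ∈ a :: t :=
      hperm.mem_iff.mp (List.getLast_mem hsne)
    have h1 : (a :: t).foldl max a ≤ s.getLast hsne :=
      pv_getLast_ge_of_pairwise s hpair hsne _ (hperm.mem_iff.mpr hmemL)
    have h2 : s.getLast hsne ≤ (a :: t).foldl max a :=
      pv_le_foldl_max (a :: t) a _ (List.mem_cons.mpr (Or.inr hmemR))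
    simp [le_antisymm h1 h2]
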